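-- pv_equiv track=rewrite | github.com/imtiaz-rahi/Py-CheckiO | SendGrid/City's Happiness/mission.py | most_crucial
-- ===== SOURCE A (Python) =====
-- import collections
--
-- def find_dups(data, val):
--     return [k for k, v in data.items() if v == val]
--
-- def most_crucial(net, users):
--     max_user = max(users, key=users.get)
--     # Check whether multiple node has same max user count
--     top_user = find_dups(users, users[max_user])
--     if len(top_user) == 1:
--         return top_user
--
--     # Prepare count of node presence in the network
--     net_count = collections.Counter([it for sub in net for it in sub])
--     top_nets = find_dups(net_count, net_count[max(net_count, key=net_count.get)])
--     if len(top_nets) == 1: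
--         return top_nets
--     return sorted(set(top_user) & set(top_nets))
-- ===== SOURCE B (Python) =====
-- def most_crucial(net, users):
--     # rank users by count descending; the tied maxima form the leading block
--     ranked = sorted(users.items(), key=lambda kv: kv[1], reverse=True)
--     top = ranked[0][1]
--     top_user = [k for k, v in ranked if v == top]
--     if len(top_user) == 1:
--         return top_user
--     # sort the flattened network and run-length encode it: counts without a hash map
--     nodes = sorted(it for sub in net for it in sub)
--     runs = []
--     i = 0
--     n = len(nodes)
--     while i < n:
--         j = i + 1
--         while j < n and nodes[j] == nodes[i]:
--             j += 1
--         runs.append((nodes[i], j - i))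
--         i = j
--     best = max(c for _, c in runs)
--     top_nets = [k for k, c in runs if c == best]
--     if len(top_nets) == 1:
--         return top_nets
--     # runs come in ascending key order, so this filter is already sorted
--     tset = set(top_user)
--     return [k for k in top_nets if k in tset]
-- ===== Notes on version B (the rewrite author's own statement) =====
-- stated objective: alternative
-- what changed: Replaces hash-based counting (collections.Counter) and max(key=get)+filter with a sort-based algorithm: users are ranked by a descending sort whose leading block is the tie list, network counts come from sorting the flattened edge list and run-length encoding it, and the final sorted set intersection becomes a plain filter of the already-sorted run keys.
import Mathlib
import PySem

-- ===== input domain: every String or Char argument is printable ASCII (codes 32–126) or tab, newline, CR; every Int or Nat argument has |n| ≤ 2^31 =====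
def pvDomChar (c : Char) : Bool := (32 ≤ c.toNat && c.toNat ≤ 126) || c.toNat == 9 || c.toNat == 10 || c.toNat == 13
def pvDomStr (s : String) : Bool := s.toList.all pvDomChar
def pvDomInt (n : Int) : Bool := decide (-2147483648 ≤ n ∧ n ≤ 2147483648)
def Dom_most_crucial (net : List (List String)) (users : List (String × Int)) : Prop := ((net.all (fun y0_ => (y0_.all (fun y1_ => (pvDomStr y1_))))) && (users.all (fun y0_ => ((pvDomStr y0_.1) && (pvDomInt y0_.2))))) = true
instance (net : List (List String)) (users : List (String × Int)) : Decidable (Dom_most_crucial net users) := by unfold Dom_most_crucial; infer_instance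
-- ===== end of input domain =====

-- B replaces A's hash-based Counter and max(key=get)+filter pattern with a sort-based algorithm
-- (descending sort for user ties, run-length encoding of the sorted flattened network for counts,
-- and a filter of the already-sorted run keys instead of sorted(set&set)); return values proved equal on Pre_.


-- ===== PORT A =====
-- find_dups(data, val) = [k for k, v in data.items() if v == val]
def find_dups (data : PySem.Dict String Int) (val : Int) : List String :=
  (data.items.filter (fun p => p.2 == val)).map (·.1)

-- max(users, key=users.get): every iterated key is present, so users.get k = users[k]; ported
-- with getD. 'none' from max? is exactly Python's ValueError on an empty sequence (outside Pre_).
def most_crucial (net : List (List String)) (users : List (String × Int)) : List String :=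
  let d := PySem.Dict.ofList users
  match PySem.List.max? d.keys (fun k => d.getD k 0) with
  | none => []   -- unreachable under Pre_ (ValueError in Python)
  | some max_user =>
    let top_user := find_dups d (d.getD max_user 0)
    if top_user.length == 1 then top_user
    else
      let net_count := PySem.Dict.counter (net.flatten)
      match PySem.List.max? net_count.keys (fun k => net_count.getD k 0) with
      | none => []   -- unreachable under Pre_ (ValueError in Python)
      | some mk =>
        let top_nets := find_dups net_count (net_count.getD mk 0)
        if top_nets.length == 1 then top_nets
        else PySem.List.sorted
               (PySem.Set.inter (PySem.Set.ofList top_user) (PySem.Set.ofList top_nets))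
               (fun x => x) false

-- ===== PORT B =====
-- Source B's two-pointer while loops over the sorted node list: the inner 'while j < n and
-- nodes[j] == nodes[i]' scan is the takeWhile prefix (j - i = 1 + its length), and the outer
-- 'i = j' step is the recursion on the remaining suffix (the dropWhile).
def runLength : List String → List (String × Int)
  | [] => []
  | x :: xs =>
    (x, 1 + ((xs.takeWhile (fun y => x == y)).length : Int))
      :: runLength (xs.dropWhile (fun y => x == y))
termination_by l => l.length
decreasing_by
  have := (List.dropWhile_sublist (p := fun y => x == y) (l := xs)).length_le
  simp only [List.length_cons]
  omega

def most_crucial_alt (net : List (List String)) (users : List (String × Int)) : List String :=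
  let ranked := PySem.List.sorted (PySem.Dict.ofList users).items (fun kv => kv.2) true
  match PySem.List.pyGet? ranked 0 with
  | none => []   -- ranked[0] raises IndexError on empty users (outside Pre_)
  | some p0 =>
    let top := p0.2
    let top_user := (ranked.filter (fun kv => kv.2 == top)).map (·.1)
    if top_user.length == 1 then top_user
    else
      let nodes := PySem.List.sorted net.flatten (fun x => x) false
      let runs := runLength nodes
      match PySem.List.max? (runs.map (·.2)) (fun c => c) with
      | none => []   -- max() raises ValueError on an empty network (outside Pre_)
      | some best =>
        let top_nets := (runs.filter (fun p => p.2 == best)).map (·.1)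
        if top_nets.length == 1 then top_nets
        else
          let tset := PySem.Set.ofList top_user
          top_nets.filter (fun k => PySem.Set.contains tset k)

-- ===== PRECONDITION & SPEC =====
-- Pre_ excludes exactly the inputs on which A raises ValueError: empty users, and a tied
-- maximal user count together with an empty flattened network (max() over an empty Counter).
def Pre_most_crucial (net : List (List String)) (users : List (String × Int)) : Prop :=
  users ≠ [] ∧
  ((((PySem.Dict.ofList users).items.filter
       (fun p => decide (∀ q ∈ (PySem.Dict.ofList users).items, q.2 ≤ p.2))).length = 1)
    ∨ net.flatten ≠ [])
instance (net : List (List String)) (users : List (String × Int)) : Decidable (Pre_most_crucial net users) := by unfold Pre_most_crucial; infer_instance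
def pvWitness_most_crucial : List (List String) × (List (String × Int)) :=
  ([["a", "b"], ["b", "c"]], [("a", 1), ("b", 2)])

def Spec_most_crucial (net : List (List String)) (users : List (String × Int)) (out : List String) : Prop := out = most_crucial_alt net users
instance (net : List (List String)) (users : List (String × Int)) (out : List String) : Decidable (Spec_most_crucial net users out) := by unfold Spec_most_crucial; infer_instance

-- ===== CLAIM (what is proved, stated in full; the proofs are below) =====
def Claim_equal_most_crucial : Prop := ∀ (net : List (List String)) (users : List (String × Int)), Dom_most_crucial net users → Pre_most_crucial net users → Spec_most_crucial net users (most_crucial net users)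

-- ===== LEMMAS AND PROOFS =====

-- the running max of the values of p :: rest is an attained upper bound
theorem maxFacts (p : String × Int) (rest : List (String × Int)) :
    (∀ q ∈ p :: rest, q.2 ≤ rest.foldl (fun a q => max a q.2) p.2) ∧
    (∃ q ∈ p :: rest, q.2 = rest.foldl (fun a q => max a q.2) p.2) := by
  constructor
  · intro q hq
    rcases List.mem_cons.1 hq with h | h
    · rw [h]; exact (PySem.List.le_foldl_max_int rest (fun q => q.2) p.2).1
    · exact (PySem.List.le_foldl_max_int rest (fun q => q.2) p.2).2 q h
  · have hM : rest.foldl (fun a q => max a q.2) p.2 = (rest.map (·.2)).foldl max p.2 := by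
      rw [List.foldl_map]
    rcases PySem.List.foldl_max_mem (rest.map (·.2)) p.2 with h | h
    · exact ⟨p, List.mem_cons_self, by rw [hM, h]⟩
    · obtain ⟨q, hq, hq2⟩ := List.mem_map.1 h
      exact ⟨q, List.mem_cons_of_mem _ hq, by rw [hM, hq2]⟩

-- the value A reads back at the key found by max(·, key=get) is the max of all values
theorem getD_max_eq (d : PySem.Dict String Int) (hnd : d.keys.Nodup)
    (p : String × Int) (rest : List (String × Int)) (hitems : d.items = p :: rest)
    (mu : String) (hmu : PySem.List.max? d.keys (fun k => d.getD k 0) = some mu) :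
    d.getD mu 0 = rest.foldl (fun a q => max a q.2) p.2 := by
  obtain ⟨hub, q0, hq0, hq0v⟩ := maxFacts p rest
  have hubA : ∀ q ∈ d.items, q.2 ≤ d.getD mu 0 := by
    intro q hq
    have h1 : q.1 ∈ d.keys := PySem.Dict.mem_keys_of_mem_items d hq
    have h2 := PySem.List.max?_isMax hmu q.1 h1
    rwa [PySem.Dict.getD_of_mem_items d (k := q.1) (v := q.2) (by simpa using hq) hnd 0] at h2
  have hmuk : mu ∈ d.keys := PySem.List.max?_mem hmu
  have hmm : mu ∈ d.items.map (·.1) := by simpa [PySem.Dict.keys] using hmuk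
  obtain ⟨q1, hq1, hq1k⟩ := List.mem_map.1 hmm
  have hval : d.getD mu 0 = q1.2 := by
    rw [← hq1k]
    exact PySem.Dict.getD_of_mem_items d (k := q1.1) (v := q1.2) (by simpa using hq1) hnd 0
  have h1 : q1.2 ≤ rest.foldl (fun a q => max a q.2) p.2 := hub q1 (hitems ▸ hq1)
  have h2 : q0.2 ≤ d.getD mu 0 := hubA q0 (hitems ▸ hq0)
  omega

-- Pre_'s declarative "is maximal" filter coincides with filtering by the max value
theorem filter_max_congr (l : List (String × Int)) (M : Int)
    (hub : ∀ q ∈ l, q.2 ≤ M) (hat : ∃ q ∈ l, q.2 = M) :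
    l.filter (fun x => decide (∀ q ∈ l, q.2 ≤ x.2)) = l.filter (fun x => x.2 == M) := by
  apply List.filter_congr
  intro x hx
  obtain ⟨q0, hq0, hq0v⟩ := hat
  have hiff : (∀ q ∈ l, q.2 ≤ x.2) ↔ x.2 = M := by
    constructor
    · intro h
      have h1 := h q0 hq0
      have h2 := hub x hx
      omega
    · intro h q hq
      have := hub q hq
      omega
  rw [Bool.beq_eq_decide_eq x.2 M]
  exact decide_eq_decide.mpr hiff

theorem items_ofList_ne_nil (u : String × Int) (us : List (String × Int)) :
    (PySem.Dict.ofList (u :: us)).items ≠ [] := by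
  have hkeys : (PySem.Dict.ofList (u :: us)).keys = PySem.Set.ofList ((u :: us).map (·.1)) := by
    show ((u :: us).foldl (fun d p => d.insert p.1 p.2) PySem.Dict.empty).keys = _
    rw [PySem.Dict.keys_foldl_insert_key]
    rfl
  have hk : u.1 ∈ (PySem.Dict.ofList (u :: us)).keys := by
    rw [hkeys]
    exact (PySem.Set.mem_ofList _ _).2 (by simp)
  intro h
  rw [PySem.Dict.keys, h] at hk
  simp at hk

theorem counter_items_ne_nil (x : String) (xs : List String) :
    (PySem.Dict.counter (x :: xs)).items ≠ [] := by
  rw [PySem.Dict.items_counter]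
  have hx : x ∈ PySem.Set.ofList (x :: xs) := (PySem.Set.mem_ofList _ _).2 (by simp)
  intro h
  rw [List.map_eq_nil_iff] at h
  rw [h] at hx
  simp at hx

-- every element of l is the first element of one of its runs
theorem mem_runLength_keys (l : List String) (x : String) :
    x ∈ (runLength l).map (·.1) ↔ x ∈ l := by
  induction l using runLength.induct with
  | case1 => simp [runLength]
  | case2 y ys ih =>
    rw [runLength]
    simp only [List.map_cons, List.mem_cons, ih]
    constructor
    · rintro (h | h)
      · exact Or.inl h
      · exact Or.inr ((List.dropWhile_sublist _).subset h)
    · rintro (h | h)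
      · exact Or.inl h
      · by_cases hx : x ∈ ys.dropWhile (fun y' => y == y')
        · exact Or.inr hx
        · left
          have hsp : x ∈ ys.takeWhile (fun y' => y == y') ++ ys.dropWhile (fun y' => y == y') := by
            rw [List.takeWhile_append_dropWhile]; exact h
          rcases List.mem_append.1 hsp with h2 | h2
          · have h3 : (y == x) = true := List.mem_takeWhile_imp h2
            exact (eq_of_beq h3).symm
          · exact absurd h2 hx

-- in a ≤-sorted list no element after the run of x equals x
theorem count_dropWhile_eq_zero (x : String) (xs : List String)
    (h : (x :: xs).Pairwise (· ≤ ·)) :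
    (xs.dropWhile (fun y => x == y)).count x = 0 := by
  rw [List.count_eq_zero]
  intro hx
  have hle : ∀ z ∈ xs, x ≤ z := (List.pairwise_cons.1 h).1
  have hdp : (xs.dropWhile (fun y => x == y)).Pairwise (· ≤ ·) :=
    (List.pairwise_cons.1 h).2.sublist (List.dropWhile_sublist _)
  cases hd : xs.dropWhile (fun y => x == y) with
  | nil => rw [hd] at hx; simp at hx
  | cons z zs =>
    have hz : ¬ (x == z) = true := by
      have := List.head?_dropWhile_not (p := fun y => x == y) (l := xs)
      rw [hd] at this
      simpa using this
    have hzx : x ≠ z := by simpa using hz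
    have hxz : x ≤ z := hle z ((List.dropWhile_sublist _).subset (by rw [hd]; exact List.mem_cons_self))
    rw [hd] at hx
    rcases List.mem_cons.1 hx with h1 | h1
    · exact hzx h1
    · have hzw : z ≤ x := (List.pairwise_cons.1 (hd ▸ hdp)).1 x h1
      exact hzx (le_antisymm hxz hzw)

-- each run of a ≤-sorted list records its key's multiplicity in the whole list
theorem runLength_count (l : List String) (h : l.Pairwise (· ≤ ·)) :
    ∀ p ∈ runLength l, p.2 = (l.count p.1 : Int) := by
  induction l using runLength.induct with
  | case1 => simp [runLength]
  | case2 x xs ih =>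
    intro p hp
    rw [runLength] at hp
    have htw : ∀ z ∈ xs.takeWhile (fun y => x == y), z = x := by
      intro z hz
      have h2 : (x == z) = true := List.mem_takeWhile_imp hz
      exact (eq_of_beq h2).symm
    have hcount : ∀ a : String, xs.count a
        = (xs.takeWhile (fun y => x == y)).count a + (xs.dropWhile (fun y => x == y)).count a := by
      intro a
      conv_lhs => rw [← List.takeWhile_append_dropWhile (p := fun y => x == y) (l := xs)]
      rw [List.count_append]
    rcases List.mem_cons.1 hp with h1 | h1
    · subst h1
      simp only
      rw [List.count_cons_self, hcount x, count_dropWhile_eq_zero x xs h]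
      have htwc : (xs.takeWhile (fun y => x == y)).count x
          = (xs.takeWhile (fun y => x == y)).length := by
        rw [List.count_eq_length]
        intro z hz
        simp [htw z hz]
      rw [htwc]
      push_cast
      ring
    · have hdp : (xs.dropWhile (fun y => x == y)).Pairwise (· ≤ ·) :=
        (List.pairwise_cons.1 h).2.sublist (List.dropWhile_sublist _)
      have hrec := ih hdp p h1
      have hpk : p.1 ∈ xs.dropWhile (fun y => x == y) :=
        (mem_runLength_keys _ _).1 (List.mem_map_of_mem h1)
      have hpx : p.1 ≠ x := by
        intro he
        have := count_dropWhile_eq_zero x xs h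
        rw [List.count_eq_zero] at this
        exact this (he ▸ hpk)
      have htwc0 : (xs.takeWhile (fun y => x == y)).count p.1 = 0 := by
        rw [List.count_eq_zero]
        intro hz
        exact hpx (htw _ hz)
      have : (x :: xs).count p.1 = (xs.dropWhile (fun y => x == y)).count p.1 := by
        rw [List.count_cons_of_ne (Ne.symm hpx), hcount p.1, htwc0]
        omega
      rw [hrec, this]

-- the run keys of a ≤-sorted list are strictly increasing
theorem runLength_keys_lt (l : List String) (h : l.Pairwise (· ≤ ·)) :
    ((runLength l).map (·.1)).Pairwise (· < ·) := by
  induction l using runLength.induct with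
  | case1 => simp [runLength]
  | case2 x xs ih =>
    rw [runLength]
    simp only [List.map_cons]
    have hdp : (xs.dropWhile (fun y => x == y)).Pairwise (· ≤ ·) :=
      (List.pairwise_cons.1 h).2.sublist (List.dropWhile_sublist _)
    refine List.pairwise_cons.2 ⟨?_, ih hdp⟩
    intro k hk
    have hkm : k ∈ xs.dropWhile (fun y => x == y) := (mem_runLength_keys _ _).1 hk
    have hxle : x ≤ k := (List.pairwise_cons.1 h).1 k ((List.dropWhile_sublist _).subset hkm)
    have hne : k ≠ x := by
      intro he
      have := count_dropWhile_eq_zero x xs h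
      rw [List.count_eq_zero] at this
      exact this (he ▸ hkm)
    exact lt_of_le_of_ne hxle (Ne.symm hne)

-- a run-length encoding is the key list tagged with multiplicities
theorem runLength_eq_map (l : List String) (h : l.Pairwise (· ≤ ·)) :
    runLength l = ((runLength l).map (·.1)).map (fun k => (k, (l.count k : Int))) := by
  rw [List.map_map]
  conv_lhs => rw [← List.map_id (runLength l)]
  apply List.map_congr_left
  intro p hp
  have := runLength_count l h p hp
  simp only [Function.comp, id]
  rw [← this]

-- two singleton-perm lists are equal
theorem perm_length_one_eq {α : Type} (l1 l2 : List α) (hp : l1.Perm l2) (h : l1.length = 1) :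
    l1 = l2 := by
  obtain ⟨a, ha⟩ := List.length_eq_one_iff.1 h
  subst ha
  exact (List.perm_singleton.1 hp.symm).symm

theorem most_crucial_eq (net : List (List String)) (users : List (String × Int))
    (hpre : Pre_most_crucial net users) :
    most_crucial net users = most_crucial_alt net users := by
  obtain ⟨hu, hdisj⟩ := hpre
  cases users with
  | nil => exact absurd rfl hu
  | cons u us =>
  have hnd := PySem.Dict.nodup_keys_ofList (u :: us)
  have hne := items_ofList_ne_nil u us
  cases hitem : (PySem.Dict.ofList (u :: us)).items with
  | nil => exact absurd hitem hne
  | cons p rest =>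
  set d := PySem.Dict.ofList (u :: us) with hd
  set M := rest.foldl (fun a q => max a q.2) p.2 with hM
  obtain ⟨hub, hat⟩ := maxFacts p rest
  have hks : d.keys ≠ [] := by simp only [PySem.Dict.keys, hitem]; simp
  obtain ⟨mu, hmu⟩ : ∃ mu, PySem.List.max? d.keys (fun k => d.getD k 0) = some mu := by
    cases h : PySem.List.max? d.keys (fun k => d.getD k 0) with
    | none => exact absurd ((PySem.List.max?_eq_none_iff _ _).1 h) hks
    | some m => exact ⟨m, rfl⟩
  have hgd : d.getD mu 0 = M := getD_max_eq d hnd p rest hitem mu hmu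
  -- B's ranked list and its head
  have hrperm : (PySem.List.sorted d.items (fun kv => kv.2) true).Perm d.items :=
    PySem.List.sorted_perm _ _ _
  have hrne : PySem.List.sorted d.items (fun kv => kv.2) true ≠ [] := by
    intro h
    exact hne ((PySem.List.sorted_eq_nil_iff _ _ _).1 h)
  cases hrk : PySem.List.sorted d.items (fun kv => kv.2) true with
  | nil => exact absurd hrk hrne
  | cons q0 qs =>
  have hq0top : q0.2 = M := by
    have hmem : q0 ∈ d.items := (hrk ▸ hrperm).mem_iff.1 List.mem_cons_self
    have h1 : q0.2 ≤ M := hub q0 (hitem ▸ hmem)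
    obtain ⟨qa, hqa, hqav⟩ := hat
    have h2 : qa.2 ≤ q0.2 :=
      PySem.List.key_head_sorted_rev_ge _ _ hrk qa (hitem ▸ hqa)
    omega
  -- A's and B's user tie lists are permutations
  have htuperm : ((d.items.filter (fun kv => kv.2 == M)).map (·.1)).Perm
      (((PySem.List.sorted d.items (fun kv => kv.2) true).filter (fun kv => kv.2 == M)).map (·.1)) :=
    (hrperm.filter _).symm.map _
  have hlen : ((d.items.filter (fun kv => kv.2 == M)).map (·.1)).length
      = (((PySem.List.sorted d.items (fun kv => kv.2) true).filter (fun kv => kv.2 == M)).map (·.1)).length :=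
    htuperm.length_eq
  -- unfold both programs down to the first branch
  rw [most_crucial, most_crucial_alt]
  rw [← hd]
  simp only [hmu, hrk, hgd]
  have hget0 : PySem.List.pyGet? (q0 :: qs) (0 : Int) = some q0 := by
    simp [PySem.List.pyGet?, PySem.List.pyIdx?]
  rw [hget0]
  simp only [find_dups, hq0top, ← hrk]
  rw [← hlen]
  cases hc : (((d.items.filter (fun kv => kv.2 == M)).map (·.1)).length == 1) with
  | true =>
    simp only [if_true]
    exact perm_length_one_eq _ _ htuperm (by simpa using hc)
  | false =>
  simp only [Bool.false_eq_true, if_false]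
  -- phase 2
  have hflat : net.flatten ≠ [] := by
    rcases hdisj with h1 | h2
    · exfalso
      rw [hitem] at h1
      rw [filter_max_congr (p :: rest) M hub hat, ← hitem] at h1
      have : ((d.items.filter (fun kv => kv.2 == M)).map (·.1)).length = 1 := by
        rw [List.length_map]; exact h1
      rw [this] at hc; simp at hc
    · exact h2
  set flat := net.flatten with hfl
  have hnd2 := PySem.Dict.nodup_keys_counter flat
  have hne2 : (PySem.Dict.counter flat).items ≠ [] := by
    cases hflc : flat with
    | nil => exact absurd hflc hflat
    | cons x xs => exact counter_items_ne_nil x xs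
  cases hitem2 : (PySem.Dict.counter flat).items with
  | nil => exact absurd hitem2 hne2
  | cons p2 rest2 =>
  set M2 := rest2.foldl (fun a q => max a q.2) p2.2 with hM2
  obtain ⟨hub2, hat2⟩ := maxFacts p2 rest2
  have hks2 : (PySem.Dict.counter flat).keys ≠ [] := by
    simp only [PySem.Dict.keys, hitem2]; simp
  obtain ⟨mk, hmk⟩ : ∃ m, PySem.List.max? (PySem.Dict.counter flat).keys
      (fun k => (PySem.Dict.counter flat).getD k 0) = some m := by
    cases h : PySem.List.max? (PySem.Dict.counter flat).keys
        (fun k => (PySem.Dict.counter flat).getD k 0) with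
    | none => exact absurd ((PySem.List.max?_eq_none_iff _ _).1 h) hks2
    | some m => exact ⟨m, rfl⟩
  have hgd2 : (PySem.Dict.counter flat).getD mk 0 = M2 :=
    getD_max_eq _ hnd2 p2 rest2 hitem2 mk hmk
  -- B's sorted nodes and runs
  set nodes := PySem.List.sorted flat (fun x => x) false with hnodes
  have hnperm : nodes.Perm flat := PySem.List.sorted_perm _ _ _
  have hnpw : nodes.Pairwise (· ≤ ·) := PySem.List.sorted_pairwise flat (fun x => x)
  set runs := runLength nodes with hruns
  have hkmem : ∀ x, x ∈ runs.map (·.1) ↔ x ∈ flat := by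
    intro x
    rw [mem_runLength_keys]
    exact hnperm.mem_iff
  have hklt : (runs.map (·.1)).Pairwise (· < ·) := runLength_keys_lt nodes hnpw
  have hknd : (runs.map (·.1)).Nodup := hklt.imp (fun h => ne_of_lt h)
  -- runs is a permutation of Counter(flat).items
  have hcnt : ∀ k, nodes.count k = flat.count k := fun k => hnperm.count_eq k
  have hrl : runs = (runs.map (·.1)).map (fun k => (k, (flat.count k : Int))) := by
    conv_lhs => rw [hruns, runLength_eq_map nodes hnpw]
    rw [hruns, List.map_map, List.map_map]
    apply List.map_congr_left
    intro k _
    simp only [Function.comp]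
    rw [hcnt]
  have hkeysperm : (runs.map (·.1)).Perm (PySem.Set.ofList flat) := by
    rw [List.perm_ext_iff_of_nodup hknd (PySem.Set.nodup_ofList flat)]
    intro a
    rw [hkmem a, PySem.Set.mem_ofList]
  have hrunsperm : runs.Perm (PySem.Dict.counter flat).items := by
    rw [PySem.Dict.items_counter]
    conv_lhs => rw [hrl]
    exact hkeysperm.map _
  -- B's max of run counts equals M2
  have hrne2 : runs.map (·.2) ≠ [] := by
    intro h
    rw [List.map_eq_nil_iff] at h
    have : nodes = [] := by
      cases hn : nodes with
      | nil => rfl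
      | cons a as => rw [hruns, hn, runLength] at h; simp at h
    exact hflat ((this ▸ hnperm).symm.eq_nil)
  obtain ⟨best, hbest⟩ : ∃ b, PySem.List.max? (runs.map (·.2)) (fun c => c) = some b := by
    cases h : PySem.List.max? (runs.map (·.2)) (fun c => c) with
    | none => exact absurd ((PySem.List.max?_eq_none_iff _ _).1 h) hrne2
    | some m => exact ⟨m, rfl⟩
  have hbM2 : best = M2 := by
    have hbm : best ∈ runs.map (·.2) := PySem.List.max?_mem hbest
    obtain ⟨pb, hpb, hpbv⟩ := List.mem_map.1 hbm
    have h1 : best ≤ M2 := by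
      have : pb ∈ (PySem.Dict.counter flat).items := hrunsperm.mem_iff.1 hpb
      rw [← hpbv]
      exact hub2 pb (hitem2 ▸ this)
    obtain ⟨qa, hqa, hqav⟩ := hat2
    have hqa' : qa ∈ runs := hrunsperm.mem_iff.2 (hitem2 ▸ hqa)
    have h2 : qa.2 ≤ best := PySem.List.max?_isMax hbest qa.2 (List.mem_map_of_mem hqa')
    omega
  -- A's and B's net tie lists are permutations
  have htnperm : (((PySem.Dict.counter flat).items.filter (fun kv => kv.2 == M2)).map (·.1)).Perm
      ((runs.filter (fun kv => kv.2 == M2)).map (·.1)) :=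
    (hrunsperm.filter _).symm.map _
  have hlen2 : (((PySem.Dict.counter flat).items.filter (fun kv => kv.2 == M2)).map (·.1)).length
      = ((runs.filter (fun kv => kv.2 == M2)).map (·.1)).length := htnperm.length_eq
  rw [← hitem2]
  simp only [hmk, hgd2, hbest, hbM2]
  rw [← hlen2]
  cases hc2 : ((((PySem.Dict.counter flat).items.filter (fun kv => kv.2 == M2)).map (·.1)).length == 1) with
  | true =>
    simp only [if_true]
    exact perm_length_one_eq _ _ htnperm (by simpa using hc2)
  | false =>
  simp only [Bool.false_eq_true, if_false]
  -- final branch: sorted set intersection (A) vs filter of the sorted run keys (B)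
  set tuA := (d.items.filter (fun kv => kv.2 == M)).map (·.1) with htuA
  set tuB := (((PySem.List.sorted d.items (fun kv => kv.2) true)).filter (fun kv => kv.2 == M)).map (·.1) with htuB
  set tnA := ((PySem.Dict.counter flat).items.filter (fun kv => kv.2 == M2)).map (·.1) with htnA
  set tnB := (runs.filter (fun kv => kv.2 == M2)).map (·.1) with htnB
  have htuAB : tuA.Perm tuB := htuperm
  have htnAB : tnA.Perm tnB := htnperm
  -- B's final list
  set final := tnB.filter (fun k => PySem.Set.contains (PySem.Set.ofList tuB) k) with hfinal
  have htnBsub : tnB.Sublist (runs.map (·.1)) := List.filter_sublist.map _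
  have hfinallt : final.Pairwise (· < ·) :=
    hklt.sublist (List.filter_sublist.trans htnBsub)
  have hfinalnd : final.Nodup := hfinallt.imp (fun h => ne_of_lt h)
  have hmemfinal : ∀ x, x ∈ final ↔ x ∈ tuA ∧ x ∈ tnA := by
    intro x
    rw [hfinal, List.mem_filter]
    constructor
    · rintro ⟨h1, h2⟩
      have h3 : x ∈ tuB := (PySem.Set.mem_ofList _ _).1 ((PySem.Set.contains_iff _ _).1 h2)
      exact ⟨htuAB.mem_iff.2 h3, htnAB.mem_iff.2 h1⟩
    · rintro ⟨h1, h2⟩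
      refine ⟨htnAB.mem_iff.1 h2, ?_⟩
      exact (PySem.Set.contains_iff _ _).2 ((PySem.Set.mem_ofList _ _).2 (htuAB.mem_iff.1 h1))
  have hinternd : (PySem.Set.inter (PySem.Set.ofList tuA) (PySem.Set.ofList tnA)).Nodup :=
    PySem.Set.nodup_inter _ _ (PySem.Set.nodup_ofList tuA)
  have hinterperm : final.Perm (PySem.Set.inter (PySem.Set.ofList tuA) (PySem.Set.ofList tnA)) := by
    rw [List.perm_ext_iff_of_nodup hfinalnd hinternd]
    intro a
    rw [hmemfinal a, PySem.Set.mem_inter, PySem.Set.mem_ofList, PySem.Set.mem_ofList]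
  exact PySem.List.sorted_eq_of_perm_of_pairwise_lt _ _ _ hinterperm hfinallt

-- ===== VERDICT (by name: the statement is the Claim_ definition above) =====
theorem most_crucial_spec : Claim_equal_most_crucial := by
  intro net users _ hpre
  unfold Spec_most_crucial
  exact most_crucial_eq net users hpre
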